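-- pv_equiv track=rewrite | github.com/TheDrakir/BeeSupervisor | lib/video_tools.py | get_video_intervals
-- ===== SOURCE A (Python) =====
-- def get_video_intervals(frames):
--     merge_dist = 10
--     intervals = []
--     i = 0
--     while i < len(frames):
--         for j in range(i, len(frames)):
--             if j + 1 == len(frames) or frames[j+1] > frames[j] + merge_dist:
--                 break
--         intervals.append((frames[i], frames[j] + merge_dist))
--         i = j + 1
--     return intervals
-- ===== SOURCE B (Python) =====
-- def get_video_intervals(frames):
--     merge_dist = 10
--     # Phase 1: partition frames into groups; a new group starts when the next
--     # frame is more than merge_dist past the previous one.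
--     groups = []
--     cur = []
--     for f in frames:
--         if cur and f > cur[-1] + merge_dist:
--             groups.append(cur)
--             cur = [f]
--         else:
--             cur.append(f)
--     if cur:
--         groups.append(cur)
--     # Phase 2: map each group to its interval.
--     return [(g[0], g[-1] + merge_dist) for g in groups]
-- ===== Notes on version B (the rewrite author's own statement) =====
-- stated objective: simpler
-- what changed: Replaces A's nested while/for-with-break index juggling with a two-phase computation: one pass partitioning frames into groups (new group when a frame exceeds the previous by more than merge_dist), then a map turning each group into (first, last+merge_dist).
import Mathlib
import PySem

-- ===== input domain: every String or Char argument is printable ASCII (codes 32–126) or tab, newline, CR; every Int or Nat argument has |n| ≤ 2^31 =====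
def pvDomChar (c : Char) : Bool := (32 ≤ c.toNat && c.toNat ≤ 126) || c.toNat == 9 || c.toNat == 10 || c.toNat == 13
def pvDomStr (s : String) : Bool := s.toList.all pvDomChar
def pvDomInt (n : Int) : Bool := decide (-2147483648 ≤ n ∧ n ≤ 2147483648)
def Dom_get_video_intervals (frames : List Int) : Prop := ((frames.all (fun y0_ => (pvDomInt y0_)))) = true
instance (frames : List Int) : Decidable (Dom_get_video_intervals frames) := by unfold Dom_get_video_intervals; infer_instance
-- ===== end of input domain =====

-- B replaces A's nested while/for-with-break index scan by a two-phase computation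
-- (partition into groups, then map each group to an interval); objective: simpler.

-- ===== PORT A =====
-- the inner 'for j in range(i, len(frames)): if … : break' loop; returns the j at which it breaks
-- (for j ≥ i with j < len the break at j+1 == len always fires, so the loop always breaks)
def pvInnerA (frames : List Int) (j : Nat) : Nat :=
  if _h : j + 1 < frames.length then
    if frames.getD (j+1) 0 > frames.getD j 0 + 10 then j
    else pvInnerA frames (j+1)
  else j
termination_by frames.length - j

theorem pvInnerA_ge (frames : List Int) (j : Nat) : j ≤ pvInnerA frames j := by
  unfold pvInnerA
  split
  · split
    · exact Nat.le_refl _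
    · have := pvInnerA_ge frames (j+1); omega
  · exact Nat.le_refl _
termination_by frames.length - j

-- the outer 'while i < len(frames)' loop accumulating intervals
def pvOuterA (frames : List Int) (i : Nat) : List (Int × Int) :=
  if _h : i < frames.length then
    (frames.getD i 0, frames.getD (pvInnerA frames i) 0 + 10) :: pvOuterA frames (pvInnerA frames i + 1)
  else []
termination_by frames.length - i
decreasing_by have := pvInnerA_ge frames i; omega

def get_video_intervals (frames : List Int) : List (Int × Int) := pvOuterA frames 0

-- ===== PORT B =====
-- one folding step of phase 1: extend the current group or close it and start a new one
def pvStepB (st : List (List Int) × List Int) (f : Int) : List (List Int) × List Int :=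
  if st.2 ≠ [] ∧ f > st.2.getLastD 0 + 10 then (st.1 ++ [st.2], [f]) else (st.1, st.2 ++ [f])

def get_video_intervals_alt (frames : List Int) : List (Int × Int) :=
  let st := frames.foldl pvStepB ([], [])
  let groups := if st.2 ≠ [] then st.1 ++ [st.2] else st.1
  groups.map (fun g => (g.getD 0 0, g.getLastD 0 + 10))

-- ===== PRECONDITION & SPEC =====
def Spec_get_video_intervals (frames : List Int) (out : List (Int × Int)) : Prop := out = get_video_intervals_alt frames
instance (frames : List Int) (out : List (Int × Int)) : Decidable (Spec_get_video_intervals frames out) := by unfold Spec_get_video_intervals; infer_instance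

-- ===== CLAIM (what is proved, stated in full; the proofs are below) =====
def Claim_equal_get_video_intervals : Prop := ∀ (frames : List Int), Dom_get_video_intervals frames → Spec_get_video_intervals frames (get_video_intervals frames)

-- ===== LEMMAS AND PROOFS =====

-- reference function: both ports compute this run decomposition.
-- s = first element of the current group, l = previous (last seen) element.
def pvAux : Int → Int → List Int → List (Int × Int)
  | s, l, [] => [(s, l + 10)]
  | s, l, f :: rest => if f > l + 10 then (s, l + 10) :: pvAux f f rest else pvAux s f rest

theorem pvA_aux (frames : List Int) (j : Nat) (s : Int) (hj : j < frames.length) :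
    pvAux s (frames.getD j 0) (frames.drop (j+1)) =
      (s, frames.getD (pvInnerA frames j) 0 + 10) :: pvOuterA frames (pvInnerA frames j + 1) := by
  by_cases h1 : j + 1 < frames.length
  · have hdrop : frames.drop (j+1) = frames.getD (j+1) 0 :: frames.drop (j+2) := by
      rw [List.getD_eq_getElem _ _ h1]
      rw [List.drop_eq_getElem_cons h1]
    by_cases hgt : frames.getD (j+1) 0 > frames.getD j 0 + 10
    · have hin : pvInnerA frames j = j := by
        rw [pvInnerA, dif_pos h1, if_pos hgt]
      rw [hdrop]
      simp only [pvAux]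
      rw [if_pos hgt, hin]
      congr 1
      rw [pvOuterA, dif_pos h1]
      exact (pvA_aux frames (j+1) (frames.getD (j+1) 0) h1)
    · have hin : pvInnerA frames j = pvInnerA frames (j+1) := by
        rw [pvInnerA, dif_pos h1, if_neg hgt]
      rw [hdrop]
      simp only [pvAux]
      rw [if_neg hgt, hin]
      exact pvA_aux frames (j+1) s h1
  · have hin : pvInnerA frames j = j := by rw [pvInnerA, dif_neg h1]
    have hdrop : frames.drop (j+1) = [] := List.drop_eq_nil_of_le (by omega)
    have hout : pvOuterA frames (j+1) = [] := by
      rw [pvOuterA, dif_neg (by omega)]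
    rw [hdrop, hin, hout]
    rfl
termination_by frames.length - j

theorem pvB_aux (rest : List Int) (groups : List (List Int)) (cur : List Int) (hc : cur ≠ []) :
    (let st := List.foldl pvStepB (groups, cur) rest
     (if st.2 ≠ [] then st.1 ++ [st.2] else st.1).map (fun g => (g.getD 0 0, g.getLastD 0 + 10))) =
      groups.map (fun g => (g.getD 0 0, g.getLastD 0 + 10)) ++ pvAux (cur.getD 0 0) (cur.getLastD 0) rest := by
  induction rest generalizing groups cur with
  | nil =>
      simp only [List.foldl_nil]
      rw [if_pos hc, List.map_append]
      rfl
  | cons f rest ih =>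
      simp only [List.foldl_cons]
      by_cases hgt : f > cur.getLastD 0 + 10
      · rw [show pvStepB (groups, cur) f = (groups ++ [cur], [f]) from by
          unfold pvStepB; rw [if_pos ⟨hc, hgt⟩]]
        rw [ih (groups ++ [cur]) [f] (by simp)]
        simp only [pvAux]
        rw [if_pos hgt, List.map_append]
        simp
      · rw [show pvStepB (groups, cur) f = (groups, cur ++ [f]) from by
          unfold pvStepB
          rw [if_neg (by intro h; exact hgt h.2)]]
        rw [ih groups (cur ++ [f]) (by simp)]
        simp only [pvAux]
        rw [if_neg hgt]
        have h0 : (cur ++ [f]).getD 0 0 = cur.getD 0 0 := by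
          cases cur with
          | nil => exact absurd rfl hc
          | cons a t => rfl
        have hl : (cur ++ [f]).getLastD 0 = f := by
          simp [List.getLastD_eq_getLast?]
        rw [h0, hl]

-- ===== VERDICT (by name: the statement is the Claim_ definition above) =====
theorem get_video_intervals_spec : Claim_equal_get_video_intervals := by
  intro frames _
  unfold Spec_get_video_intervals get_video_intervals get_video_intervals_alt
  cases frames with
  | nil =>
      rw [pvOuterA, dif_neg (by simp)]
      rfl
  | cons f rest =>
      have hlen : 0 < (f :: rest).length := by simp
      have hA := pvA_aux (f :: rest) 0 f hlen
      have hOut : pvOuterA (f :: rest) 0 =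
          (f, (f :: rest).getD (pvInnerA (f :: rest) 0) 0 + 10) ::
            pvOuterA (f :: rest) (pvInnerA (f :: rest) 0 + 1) := by
        rw [pvOuterA, dif_pos hlen]
        rfl
      have hstep : pvStepB ([], ([] : List Int)) f = ([], [f]) := by
        unfold pvStepB
        rw [if_neg (by intro h; exact h.1 rfl)]
        rfl
      simp only [List.foldl_cons, hstep]
      have hB := pvB_aux rest ([] : List (List Int)) [f] (by simp)
      simp only [List.map_nil, List.nil_append] at hB
      rw [hB]
      have : pvAux f f rest = pvAux f ((f :: rest).getD 0 0) ((f :: rest).drop 1) := rfl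
      rw [hOut, ← hA]
      rfl
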